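-- pv_equiv track=rewrite | github.com/zdodds/contributed-submissions | submissions_cs35_sp2025/submission_359/final|hw1pr1 .py | getLastName
-- ===== SOURCE A (Python) =====
-- def getLastName(text):
--     #
--     # This function takes a text file, assuming the structure that it is two lines, with the name on the second line, and splits it into the name
--     # portion, trims the edges of any whitespace, and locates and returns the last name
--     #
--
--     lName = ''
--     comma = False
--     commaLoc = 0
--     spaceLoc = 0
--     text = text.split('\n')[1]
--     text = text.strip()
--     for i in range(len(text)):
--                 if text[i] == ',':
--                     commaLoc = i
--                     comma = True
--                 elif text[i] == ' ':
--                      spaceLoc = i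
--     if comma == True:
--         for i in range(0, commaLoc):
--             if text[i] != ' ':
--                 lName += text[i]
--     else:
--         for i in range(spaceLoc, len(text)):
--             if text[i] != ' ':
--                 lName += text[i]
--     lName = lName.lower()
--     return lName
-- ===== SOURCE B (Python) =====
-- def getLastName(text):
--     line = text.split('\n')[1].strip()
--     if ',' in line:
--         last = line.rsplit(',', 1)[0]
--     else:
--         last = line.rsplit(' ', 1)[-1]
--     return last.replace(' ', '').lower()
-- ===== Notes on version B (the rewrite author's own statement) =====
-- stated objective: idiomatic
-- what changed: Replaces A's index-scanning loop (tracking the last comma/space positions) and its two character-by-character accumulation loops with a comma membership test plus rsplit on the last separator, followed by one space-removing replace and lower.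
import Mathlib
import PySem

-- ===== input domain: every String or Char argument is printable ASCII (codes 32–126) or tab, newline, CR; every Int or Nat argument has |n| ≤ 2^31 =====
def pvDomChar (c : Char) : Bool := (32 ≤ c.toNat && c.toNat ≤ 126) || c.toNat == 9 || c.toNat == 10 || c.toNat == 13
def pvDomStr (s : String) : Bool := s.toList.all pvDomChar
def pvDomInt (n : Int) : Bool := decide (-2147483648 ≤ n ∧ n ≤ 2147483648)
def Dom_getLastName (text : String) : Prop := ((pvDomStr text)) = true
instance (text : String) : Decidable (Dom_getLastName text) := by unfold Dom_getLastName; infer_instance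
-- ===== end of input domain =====

-- B replaces A's index-scanning loop and two character-accumulation loops by a comma membership test
-- plus rsplit on the last separator; objective: idiomatic, same cost.

-- ===== PORT A =====
-- state of A's scanning loop: (commaLoc, comma, spaceLoc)
def pvStep (t : List Char) (st : Int × Bool × Int) (i : Int) : Int × Bool × Int :=
  if PySem.List.pyGetD t i ' ' = ',' then (i, true, st.2.2)
  else if PySem.List.pyGetD t i ' ' = ' ' then (st.1, st.2.1, i)
  else st

-- A's character-accumulation loop "for i in range(a, b): if text[i] != ' ': lName += text[i]"
def pvBuild (t : List Char) (a b : Int) : List Char :=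
  (PySem.List.pyRange a b 1).foldl
    (fun acc i => if PySem.List.pyGetD t i ' ' ≠ ' ' then acc ++ [PySem.List.pyGetD t i ' '] else acc) []

def getLastName (text : String) : String :=
  let t := PySem.Chars.strip ((PySem.List.pyGet? (PySem.Chars.splitOn text.toList ['\n']) 1).getD [])
  let st := (PySem.List.pyRange 0 (t.length : Int) 1).foldl (pvStep t) (0, false, 0)
  let lName := if st.2.1 = true then pvBuild t 0 st.1 else pvBuild t st.2.2 (t.length : Int)
  String.ofList (PySem.Chars.lower lName)

-- ===== PORT B =====
def getLastName_alt (text : String) : String :=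
  let line := PySem.Chars.strip ((PySem.List.pyGet? (PySem.Chars.splitOn text.toList ['\n']) 1).getD [])
  let last :=
    if PySem.Chars.isIn [','] line then
      -- line.rsplit(',', 1)[0] = everything strictly before the LAST ',' (exact: ',' ∈ line here)
      ((line.reverse.dropWhile (· ≠ ',')).tail).reverse
    else
      -- line.rsplit(' ', 1)[-1] = everything after the LAST ' ' (the whole line when ' ' ∉ line) — exact
      (line.reverse.takeWhile (· ≠ ' ')).reverse
  String.ofList (PySem.Chars.lower (PySem.Chars.replace last [' '] []))

-- ===== PRECONDITION & SPEC =====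
-- Pre_ excludes exactly the single-line inputs (no newline character), on which A's indexing of the split raises IndexError.
def Pre_getLastName (text : String) : Prop := PySem.Chars.isIn ['\n'] text.toList = true
instance (text : String) : Decidable (Pre_getLastName text) := by unfold Pre_getLastName; infer_instance
def pvWitness_getLastName : String := "hw1\nDodds, Zach"

def Spec_getLastName (text : String) (out : String) : Prop := out = getLastName_alt text
instance (text : String) (out : String) : Decidable (Spec_getLastName text out) := by unfold Spec_getLastName; infer_instance

-- ===== CLAIM (what is proved, stated in full; the proofs are below) =====
def Claim_equal_getLastName : Prop := ∀ (text : String), Dom_getLastName text → Pre_getLastName text → Spec_getLastName text (getLastName text)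

-- ===== LEMMAS AND PROOFS =====

-- "l.replace(c, '')" for a single character c is filtering c out
theorem pvGo_spec (c : Char) (fuel : Nat) (l acc : List Char) (h : l.length ≤ fuel) :
    PySem.Chars.replace.go [c] [] fuel l acc = acc.reverse ++ l.filter (fun x => x ≠ c) := by
  induction fuel generalizing l acc with
  | zero =>
    cases l with
    | nil => simp [PySem.Chars.replace.go]
    | cons x t => simp at h
  | succ n ih =>
    cases l with
    | nil => simp [PySem.Chars.replace.go]
    | cons x t =>
      simp only [PySem.Chars.replace.go, List.isPrefixOf]
      by_cases hx : c = x
      · subst hx; simp [ih t _ (by simpa using Nat.le_of_succ_le_succ h)]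
      · simp [hx, Ne.symm hx, ih t _ (by simpa using Nat.le_of_succ_le_succ h)]

theorem pvReplace_filter (l : List Char) (c : Char) :
    PySem.Chars.replace l [c] [] = l.filter (fun x => x ≠ c) := by
  simp [PySem.Chars.replace, pvGo_spec c l.length l [] le_rfl]

-- A's accumulation loop is a filter
theorem pvFoldl_filter (l : List Char) :
    l.foldl (fun acc x => if x ≠ ' ' then acc ++ [x] else acc) [] = l.filter (fun x => x ≠ ' ') := by
  have h := PySem.List.foldl_append_if (fun x : Char => x != ' ') id l []
  simpa [bne_iff_ne] using h

theorem pvBuild_drop (t : List Char) (a : Nat) :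
    pvBuild t (a : Int) (t.length : Int) = (t.drop a).filter (fun x => x ≠ ' ') := by
  unfold pvBuild
  rw [PySem.List.foldl_pyRange_pyGetD' t ' ' (fun acc x => if x ≠ ' ' then acc ++ [x] else acc) [] (a := a) (by positivity)]
  · simp only [Int.toNat_natCast]; exact pvFoldl_filter _

theorem pvBuild_take (t : List Char) (c : Nat) (h : c ≤ t.length) :
    pvBuild t 0 (c : Int) = (t.take c).filter (fun x => x ≠ ' ') := by
  unfold pvBuild
  have hc : ((t.take c).length : Int) = (c : Int) := by simp [Nat.min_eq_left h]
  rw [PySem.List.foldl_congr_mem _ _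
      (fun acc i => if PySem.List.pyGetD (t.take c) i ' ' ≠ ' ' then acc ++ [PySem.List.pyGetD (t.take c) i ' '] else acc) _ ?_]
  · rw [← hc, PySem.List.foldl_pyRange_zero_pyGetD' (t.take c) ' '
        (fun acc x => if x ≠ ' ' then acc ++ [x] else acc) []]
    exact pvFoldl_filter _
  · intro acc i hi
    rw [PySem.List.mem_pyRange_one] at hi
    have e : PySem.List.pyGetD t i ' ' = PySem.List.pyGetD (t.take c) i ' ' := by
      rw [PySem.List.pyGetD_eq_getElem t ' ' hi.1 (by omega),
          PySem.List.pyGetD_eq_getElem (t.take c) ' ' hi.1 (by simp; omega)]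
      rw [List.getElem_take]
    rw [e]

-- A's scanning loop computes: comma = (',' ∈ t); commaLoc = number of characters strictly before
-- the last ',' (0 when none); spaceLoc = number of characters strictly before the last ' ' (0 when none).
theorem pvLoop_spec (t : List Char) :
    (PySem.List.pyRange 0 (t.length : Int) 1).foldl (pvStep t) (0, false, 0) =
      ((if ',' ∈ t then ((t.reverse.dropWhile (· ≠ ',')).tail.length : Int) else 0),
       decide (',' ∈ t),
       (if ' ' ∈ t then ((t.reverse.dropWhile (· ≠ ' ')).tail.length : Int) else 0)) := by
  induction t using List.reverseRecOn with
  | nil => simp [PySem.List.pyRange_one_eq_nil]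
  | append_singleton t x ih =>
    have hlen : ((t ++ [x]).length : Int) = (t.length : Int) + 1 := by simp
    rw [hlen, PySem.List.pyRange_one_succ_right (by positivity), List.foldl_append]
    have h1 : (PySem.List.pyRange 0 (t.length : Int) 1).foldl (pvStep (t ++ [x])) (0, false, 0) =
        (PySem.List.pyRange 0 (t.length : Int) 1).foldl (pvStep t) (0, false, 0) := by
      refine PySem.List.foldl_congr_mem _ _ _ _ ?_
      intro acc i hi
      rw [PySem.List.mem_pyRange_one] at hi
      unfold pvStep
      rw [PySem.List.pyGetD_eq_getElem _ ' ' hi.1 (by simp; omega),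
          PySem.List.pyGetD_eq_getElem t ' ' hi.1 (by omega),
          List.getElem_append_left (by omega)]
    rw [h1, ih]
    have hx : PySem.List.pyGetD (t ++ [x]) (t.length : Int) ' ' = x := by
      rw [PySem.List.pyGetD_eq_getElem _ ' ' (by positivity) (by simp)]
      simp
    simp only [List.foldl_cons, List.foldl_nil, pvStep, hx]
    by_cases hc : x = ','
    · subst hc
      simp [List.mem_append]
    · by_cases hs : x = ' '
      · subst hs
        simp [List.mem_append, hc]
      · simp [List.mem_append, hc, hs, Ne.symm hc, Ne.symm hs]

-- split t at the LAST character failing p (read off t.reverse)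
theorem pvDecomp (p : Char → Bool) (t : List Char) (h : t.reverse.dropWhile p ≠ []) :
    t = (t.reverse.dropWhile p).tail.reverse ++
        ((t.reverse.dropWhile p).head h :: (t.reverse.takeWhile p).reverse) := by
  conv_lhs => rw [← t.reverse_reverse, ← List.takeWhile_append_dropWhile (p := p) (l := t.reverse)]
  rw [List.reverse_append]
  have hd : (t.reverse.dropWhile p).reverse =
      (t.reverse.dropWhile p).tail.reverse ++ [(t.reverse.dropWhile p).head h] := by
    conv_lhs => rw [← List.cons_head_tail h]
    simp
  rw [hd, List.append_assoc]
  simp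

-- the list-level core: A's post-strip computation equals B's
theorem pvCore (t : List Char) :
    (let st := (PySem.List.pyRange 0 (t.length : Int) 1).foldl (pvStep t) (0, false, 0)
     if st.2.1 = true then pvBuild t 0 st.1 else pvBuild t st.2.2 (t.length : Int)) =
      PySem.Chars.replace
        (if PySem.Chars.isIn [','] t then ((t.reverse.dropWhile (· ≠ ',')).tail).reverse
         else (t.reverse.takeWhile (· ≠ ' ')).reverse) [' '] [] := by
  rw [pvLoop_spec, pvReplace_filter]
  by_cases hc : ',' ∈ t
  · have hmem : PySem.Chars.isIn [','] t = true :=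
      (PySem.Chars.isIn_iff_infix _ _).mpr ((List.singleton_infix_iff ',' t).mpr hc)
    have hne : t.reverse.dropWhile (· ≠ ',') ≠ [] := by
      simp only [ne_eq, List.dropWhile_eq_nil_iff]
      push Not
      exact ⟨',', by simpa using hc, by simp⟩
    simp only [hc, hmem, if_true, decide_true]
    rw [pvBuild_take t _ (by
      have := List.length_dropWhile_le (p := fun x => decide (x ≠ ',')) (l := t.reverse)
      have h2 : (t.reverse.dropWhile (· ≠ ',')).tail.length = (t.reverse.dropWhile (· ≠ ',')).length - 1 := List.length_tail
      simp only [List.length_reverse] at *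
      omega)]
    congr 1
    conv_lhs => rw [pvDecomp (· ≠ ',') t hne]
    rw [List.take_left' (by simp)]
  · have hmem : PySem.Chars.isIn [','] t = false := by
      rw [PySem.Chars.isIn_eq_false_iff _ _]
      intro hinf
      exact hc ((List.singleton_infix_iff ',' t).mp hinf)
    simp only [hc, hmem, if_false, decide_false, Bool.false_eq_true]
    by_cases hs : ' ' ∈ t
    · have hne : t.reverse.dropWhile (· ≠ ' ') ≠ [] := by
        simp only [ne_eq, List.dropWhile_eq_nil_iff]
        push Not
        exact ⟨' ', by simpa using hs, by simp⟩
      have hhead : (t.reverse.dropWhile (· ≠ ' ')).head hne = ' ' := by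
        have := List.head_dropWhile_not (fun x : Char => decide (x ≠ ' ')) hne
        simpa using this
      simp only [hs, if_true]
      rw [pvBuild_drop]
      conv_lhs => rw [pvDecomp (· ≠ ' ') t hne]
      rw [List.drop_left' (by simp), hhead]
      have hw : ∀ x ∈ (t.reverse.takeWhile (· ≠ ' ')).reverse, x ≠ ' ' := by
        intro x hxmem
        have := List.mem_takeWhile_imp (by simpa using hxmem)
        simpa using this
      simp only [List.filter_cons]
      simp
    · have hT : t.reverse.takeWhile (· ≠ ' ') = t.reverse := by
        rw [List.takeWhile_eq_self_iff]
        intro x hx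
        simp only [decide_eq_true_eq]
        intro he
        exact hs (by simpa [he] using (List.mem_reverse.mp hx))
      simp only [hs, if_false]
      have h0 : pvBuild t (0 : Int) (t.length : Int) = t.filter (fun x => x ≠ ' ') := by
        simpa using pvBuild_drop t 0
      rw [h0, hT, List.reverse_reverse]

-- ===== VERDICT (by name: the statement is the Claim_ definition above) =====
theorem getLastName_spec : Claim_equal_getLastName := by
  intro text _ _
  unfold Spec_getLastName getLastName getLastName_alt
  simp only []
  rw [pvCore]
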